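-- pv_equiv track=rewrite | github.com/Shakthi-RL/PYTHON- | 33_flipthematri.py | flippingMatrix
-- ===== SOURCE A (Python) =====
-- def flippingMatrix(matrix):
--     n = len(matrix) // 2
--     total = 0
--     for i in range(n):
--         for j in range(n):
--             total += max(
--                 matrix[i][j],
--                 matrix[i][2*n - 1 - j],
--                 matrix[2*n - 1 - i][j],
--                 matrix[2*n - 1 - i][2*n - 1 - j]
--             )
--     return total
-- ===== SOURCE B (Python) =====
-- def flippingMatrix(matrix):
--     m = 2 * (len(matrix) // 2)
--     best = {}
--     for i in range(m):
--         row = matrix[i]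
--         for j in range(m):
--             k = (min(i, m - 1 - i), min(j, m - 1 - j))
--             v = row[j]
--             best[k] = max(best.get(k, v), v)
--     return sum(best.values())
-- ===== Notes on version B (the rewrite author's own statement) =====
-- stated objective: alternative
-- what changed: Replaces the quadrant double loop with its four mirror lookups by a single scan over every cell of the full matrix that groups cells into orbits via a canonical key (min(i,m-1-i), min(j,m-1-j)) in a dict of running per-orbit maxima, then sums the dict's values.
import Mathlib
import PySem

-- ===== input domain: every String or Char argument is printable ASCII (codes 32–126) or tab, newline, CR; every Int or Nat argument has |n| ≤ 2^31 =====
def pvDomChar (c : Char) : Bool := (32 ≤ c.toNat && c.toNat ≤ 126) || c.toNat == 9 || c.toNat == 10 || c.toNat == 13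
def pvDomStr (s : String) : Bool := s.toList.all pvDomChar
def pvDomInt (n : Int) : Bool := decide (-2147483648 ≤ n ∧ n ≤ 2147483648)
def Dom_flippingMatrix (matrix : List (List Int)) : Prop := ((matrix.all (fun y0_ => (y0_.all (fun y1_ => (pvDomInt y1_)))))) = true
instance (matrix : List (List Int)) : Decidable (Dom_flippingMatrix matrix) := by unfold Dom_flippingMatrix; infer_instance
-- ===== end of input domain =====

-- B replaces A's quadrant loop (four mirror lookups per quadrant cell) by one scan over
-- every cell of the full matrix keeping a dict of per-orbit maxima under the canonical
-- key (min(i,m-1-i), min(j,m-1-j)), then sums the dict's values (objective: alternative).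

-- ===== PORT A =====
def flippingMatrix (matrix : List (List Int)) : Int :=
  let n : Int := PySem.Int.floordiv (PySem.List.len matrix) 2
  (PySem.List.pyRange 0 n 1).foldl (fun total i =>
    (PySem.List.pyRange 0 n 1).foldl (fun total j =>
      total +
        max (max (max
          (PySem.List.pyGetD (PySem.List.pyGetD matrix i []) j 0)
          (PySem.List.pyGetD (PySem.List.pyGetD matrix i []) (2*n - 1 - j) 0))
          (PySem.List.pyGetD (PySem.List.pyGetD matrix (2*n - 1 - i) []) j 0))
          (PySem.List.pyGetD (PySem.List.pyGetD matrix (2*n - 1 - i) []) (2*n - 1 - j) 0)) total) 0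

-- ===== PORT B =====
def flippingMatrix_alt (matrix : List (List Int)) : Int :=
  let m : Int := 2 * PySem.Int.floordiv (PySem.List.len matrix) 2
  let best : PySem.Dict (Int × Int) Int :=
    (PySem.List.pyRange 0 m 1).foldl (fun best i =>
      let row := PySem.List.pyGetD matrix i []
      (PySem.List.pyRange 0 m 1).foldl (fun best j =>
        let k := (min i (m - 1 - i), min j (m - 1 - j))
        let v := PySem.List.pyGetD row j 0
        best.insert k (max (best.getD k v) v)) best) PySem.Dict.empty
  (PySem.Dict.values best).sum

-- ===== PRECONDITION & SPEC =====
-- Pre_ excludes exactly the inputs on which both Pythons raise IndexError: some row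
-- among the first 2*(len//2) rows is shorter than 2*(len//2).
def Pre_flippingMatrix (matrix : List (List Int)) : Prop :=
  ∀ r ∈ matrix.take (2 * (matrix.length / 2)), 2 * (matrix.length / 2) ≤ r.length
instance (matrix : List (List Int)) : Decidable (Pre_flippingMatrix matrix) := by
  unfold Pre_flippingMatrix; infer_instance

def pvWitness_flippingMatrix : List (List Int) := [[1, 2], [3, 4]]

def Spec_flippingMatrix (matrix : List (List Int)) (out : Int) : Prop := out = flippingMatrix_alt matrix
instance (matrix : List (List Int)) (out : Int) : Decidable (Spec_flippingMatrix matrix out) := by unfold Spec_flippingMatrix; infer_instance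

-- ===== CLAIM (what is proved, stated in full; the proofs are below) =====
def Claim_equal_flippingMatrix : Prop := ∀ (matrix : List (List Int)), Dom_flippingMatrix matrix → Pre_flippingMatrix matrix → Spec_flippingMatrix matrix (flippingMatrix matrix)

-- ===== LEMMAS AND PROOFS =====

-- the common value: sum over the quadrant of the max of the four mirror cells (Nat indices)
def pvCell (M : List (List Int)) (i j : Nat) : Int := (M.getD i []).getD j 0

def pvSpecSum (M : List (List Int)) : Int :=
  let n := M.length / 2
  ((List.range n).map (fun i =>
    ((List.range n).map (fun j =>
      max (max (max (pvCell M i j) (pvCell M i (2*n-1-j)))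
        (pvCell M (2*n-1-i) j)) (pvCell M (2*n-1-i) (2*n-1-j)))).sum)).sum

lemma a_eq_spec (M : List (List Int)) : flippingMatrix M = pvSpecSum M := by
  have hn : PySem.Int.floordiv (PySem.List.len M) 2 = ((M.length / 2 : Nat) : Int) := by
    simp [PySem.List.len_eq]
  simp only [flippingMatrix, pvSpecSum, hn]
  set n := M.length / 2 with hn'
  rw [PySem.List.pyRange_zero_natCast n]
  simp only [PySem.List.foldl_add, zero_add, List.map_map]
  congr 1
  apply List.map_congr_left
  intro i hi
  have hi' : i < n := List.mem_range.mp hi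
  simp only [Function.comp_apply]
  congr 1
  apply List.map_congr_left
  intro j hj
  have hj' : j < n := List.mem_range.mp hj
  have e1 : 2 * ((n : Int)) - 1 - (j : Int) = ((2*n-1-j : Nat) : Int) := by omega
  have e2 : 2 * ((n : Int)) - 1 - (i : Int) = ((2*n-1-i : Nat) : Int) := by omega
  simp only [Function.comp_apply, e1, e2, PySem.List.pyGetD_natCast, pvCell]

-- the per-cell update of B's loop
def pvUpd (d : PySem.Dict (Int × Int) Int) (p : (Int × Int) × Int) : PySem.Dict (Int × Int) Int :=
  d.insert p.1 (max (d.getD p.1 p.2) p.2)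

-- the stream of (canonical key, cell value) pairs B scans, row-major (Nat indices, m = 2n)
def pvPairs (M : List (List Int)) : List ((Int × Int) × Int) :=
  let m := 2 * (M.length / 2)
  (List.range m).flatMap (fun i =>
    (List.range m).map (fun j =>
      (((min i (m-1-i) : Nat), (min j (m-1-j) : Nat)), pvCell M i j)))

lemma get?_foldl_upd (L : List ((Int × Int) × Int)) (d : PySem.Dict (Int × Int) Int)
    (k : Int × Int) :
    (L.foldl pvUpd d).get? k
      = (L.filter (fun p => decide (p.1 = k))).foldl
          (fun o p => some (max (o.getD p.2) p.2)) (d.get? k) := by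
  induction L generalizing d with
  | nil => rfl
  | cons p L ih =>
    by_cases h : p.1 = k
    · subst h
      rw [List.foldl_cons, ih, List.filter_cons_of_pos (by simp), List.foldl_cons]
      congr 1
      simp [pvUpd, PySem.Dict.get?_insert_self, PySem.Dict.getD_eq_get?_getD]
    · rw [List.foldl_cons, ih, List.filter_cons_of_neg (by simp [h])]
      congr 1
      simp [pvUpd, PySem.Dict.get?_insert_of_ne _ _ (Ne.symm h)]

lemma b_eq_fold (M : List (List Int)) :
    flippingMatrix_alt M = (((pvPairs M).foldl pvUpd PySem.Dict.empty).values).sum := by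
  have hn : PySem.Int.floordiv (PySem.List.len M) 2 = ((M.length / 2 : Nat) : Int) := by
    simp [PySem.List.len_eq]
  simp only [flippingMatrix_alt, hn, pvPairs]
  set n := M.length / 2 with hn'
  have hm : (2 : Int) * ((n : Nat) : Int) = ((2 * n : Nat) : Int) := by push_cast; ring
  rw [hm, PySem.List.pyRange_zero_natCast (2*n), List.foldl_map, List.foldl_flatMap]
  congr 2
  apply PySem.List.foldl_congr_mem
  intro d a ha
  have ha' : a < 2*n := List.mem_range.mp ha
  rw [List.foldl_map, List.foldl_map]
  apply PySem.List.foldl_congr_mem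
  intro d' j hj
  have hj' : j < 2*n := List.mem_range.mp hj
  have e1 : ((2*n : Nat) : Int) - 1 - (a : Int) = ((2*n-1-a : Nat) : Int) := by omega
  have e2 : ((2*n : Nat) : Int) - 1 - (j : Int) = ((2*n-1-j : Nat) : Int) := by omega
  simp only [pvUpd, e1, e2, PySem.List.pyGetD_natCast, pvCell, Nat.cast_min]

-- filter of a range by "j = b ∨ j = c" (b < c) keeps [b, c], clipped to the range
lemma filter_range_two (b c : Nat) (h : b < c) (N : Nat) :
    (List.range N).filter (fun j => decide (j = b ∨ j = c))
      = (if b < N then [b] else []) ++ (if c < N then [c] else []) := by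
  induction N with
  | zero => simp
  | succ N ih =>
    rw [List.range_succ, List.filter_append, ih]
    by_cases hb : b < N <;> by_cases hc : c < N <;>
      simp_all [List.filter_cons] <;> split_ifs <;> simp_all <;> omega

-- flatMap over a range of a function vanishing except at a concatenates the single value
lemma flatMap_range_one {α : Type} (a N : Nat) (ha : a < N) (X : List α) :
    (List.range N).flatMap (fun i => if i = a then X else []) = X := by
  induction N with
  | zero => omega
  | succ N ih =>
    rw [List.range_succ, List.flatMap_append]
    by_cases hac : a < N
    · have h1 : ¬ (N = a) := by omega
      rw [ih hac]
      simp [h1]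
    · have : a = N := by omega
      subst this
      have hz : (List.range a).flatMap (fun i => if i = a then X else []) = [] := by
        apply List.flatMap_eq_nil_iff.mpr
        intro i hi
        have : i < a := List.mem_range.mp hi
        have h1 : ¬ (i = a) := by omega
        simp [h1]
      simp [hz]

-- flatMap over a range of a function vanishing except at a < c concatenates the two values
lemma flatMap_range_two {α : Type} (a c N : Nat) (h : a < c) (hc : c < N)
    (X Y : List α) :
    (List.range N).flatMap (fun i => if i = a then X else if i = c then Y else [])
      = X ++ Y := by
  induction N with
  | zero => omega
  | succ N ih =>
    rw [List.range_succ, List.flatMap_append]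
    by_cases hcN : c < N
    · rw [ih hcN]
      have h1 : ¬ (N = a) := by omega
      have h2 : ¬ (N = c) := by omega
      simp [h1, h2]
    · have hcN' : c = N := by omega
      subst hcN'
      have hrest : (List.range c).flatMap (fun i => if i = a then X else if i = c then Y else [])
          = (List.range c).flatMap (fun i => if i = a then X else []) := by
        apply List.flatMap_congr
        intro i hi
        have hic : i < c := List.mem_range.mp hi
        by_cases h1 : i = a
        · simp [h1]
        · have h2 : ¬ (i = c) := by omega
          simp [h1, h2]
      rw [hrest, flatMap_range_one a c h X]
      have h1 : ¬ (c = a) := by omega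
      simp [h1]

lemma pairs_filter (M : List (List Int)) (n a b : Nat) (hn : n = M.length / 2)
    (ha : a < n) (hb : b < n) :
    (pvPairs M).filter (fun p => decide (p.1 = (((a : Nat) : Int), ((b : Nat) : Int))))
      = [((((a : Nat) : Int), ((b : Nat) : Int)), pvCell M a b),
         ((((a : Nat) : Int), ((b : Nat) : Int)), pvCell M a (2*n-1-b)),
         ((((a : Nat) : Int), ((b : Nat) : Int)), pvCell M (2*n-1-a) b),
         ((((a : Nat) : Int), ((b : Nat) : Int)), pvCell M (2*n-1-a) (2*n-1-b))] := by
  simp only [pvPairs, ← hn, List.filter_flatMap]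
  have hrow : ∀ i ∈ List.range (2*n),
      ((List.range (2*n)).map (fun j =>
          ((((min i (2*n-1-i) : Nat) : Int), ((min j (2*n-1-j) : Nat) : Int)), pvCell M i j))).filter
        (fun p => decide (p.1 = (((a : Nat) : Int), ((b : Nat) : Int))))
      = (if i = a then
           [((((a : Nat) : Int), ((b : Nat) : Int)), pvCell M a b),
            ((((a : Nat) : Int), ((b : Nat) : Int)), pvCell M a (2*n-1-b))]
         else if i = 2*n-1-a then
           [((((a : Nat) : Int), ((b : Nat) : Int)), pvCell M (2*n-1-a) b),
            ((((a : Nat) : Int), ((b : Nat) : Int)), pvCell M (2*n-1-a) (2*n-1-b))]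
         else []) := by
    intro i hi
    have hi' : i < 2*n := List.mem_range.mp hi
    rw [List.filter_map]
    by_cases hia : min i (2*n-1-i) = a
    · -- row contributes: i = a or i = 2*n-1-a
      have hfilt : (List.range (2*n)).filter
          ((fun p => decide (p.1 = (((a : Nat) : Int), ((b : Nat) : Int)))) ∘
            (fun j => ((((min i (2*n-1-i) : Nat) : Int), ((min j (2*n-1-j) : Nat) : Int)), pvCell M i j)))
          = [b, 2*n-1-b] := by
        have hcong : ∀ j ∈ List.range (2*n),
            ((fun p => decide (p.1 = (((a : Nat) : Int), ((b : Nat) : Int)))) ∘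
              (fun j => ((((min i (2*n-1-i) : Nat) : Int), ((min j (2*n-1-j) : Nat) : Int)), pvCell M i j))) j
            = decide (j = b ∨ j = 2*n-1-b) := by
          intro j hj
          have hj' : j < 2*n := List.mem_range.mp hj
          simp only [Function.comp_apply, hia, Prod.mk.injEq, Nat.cast_inj, decide_eq_decide,
            true_and]
          omega
        rw [List.filter_congr hcong,
          filter_range_two b (2*n-1-b) (by omega) (2*n)]
        have h1 : b < 2*n := by omega
        have h2 : 2*n-1-b < 2*n := by omega
        simp [h1, h2]
      rw [hfilt]
      have hcases : i = a ∨ i = 2*n-1-a := by omega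
      have eb : min b (2*n-1-b) = b := by omega
      have eb2 : min (2*n-1-b) (2*n-1-(2*n-1-b)) = b := by omega
      rcases hcases with h | h
      · subst h
        rw [if_pos rfl]
        simp only [List.map_cons, List.map_nil, eb, eb2, hia]
      · have hne : ¬ (i = a) := by omega
        rw [if_neg hne, if_pos h]
        subst h
        simp only [List.map_cons, List.map_nil, eb, eb2, hia]
    · -- row contributes nothing
      have h1 : ¬ (i = a) := by omega
      have h2 : ¬ (i = 2*n-1-a) := by omega
      rw [if_neg h1, if_neg h2]
      rw [List.filter_eq_nil_iff.mpr, List.map_nil]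
      intro j hj
      simp only [Function.comp_apply, Prod.mk.injEq, Nat.cast_inj, decide_eq_true_eq]
      exact fun hc => hia hc.1
  rw [List.flatMap_congr hrow, flatMap_range_two a (2*n-1-a) (2*n) (by omega) (by omega)]
  rfl

-- the quadrant key list, row-major
def pvQuad (n : Nat) : List (Int × Int) :=
  (List.range n).flatMap (fun a => (List.range n).map (fun b => (((a : Nat) : Int), ((b : Nat) : Int))))

lemma keys_fold (M : List (List Int)) :
    ((pvPairs M).foldl pvUpd PySem.Dict.empty).keys
      = PySem.Set.ofList ((pvPairs M).map Prod.fst) := by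
  have h := PySem.Dict.keys_foldl_insert_key (l := pvPairs M) (key := Prod.fst)
    (f := fun d p => max (d.getD p.1 p.2) p.2) (d := PySem.Dict.empty)
  simpa [pvUpd, PySem.Dict.keys_empty, PySem.Set.update_nil_left] using h

lemma nodup_keys_fold (M : List (List Int)) :
    ((pvPairs M).foldl pvUpd PySem.Dict.empty).keys.Nodup := by
  have h := PySem.Dict.nodup_keys_foldl_insert_key (pvPairs M) Prod.fst
    (fun d p => max (d.getD p.1 p.2) p.2) PySem.Dict.empty PySem.Dict.nodup_keys_empty
  simpa [pvUpd] using h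

lemma nodup_quad (n : Nat) : (pvQuad n).Nodup := by
  have : pvQuad n = ((List.range n) ×ˢ (List.range n)).map
      (fun p => (((p.1 : Nat) : Int), ((p.2 : Nat) : Int))) := by
    simp [pvQuad, SProd.sprod, List.product, List.map_flatMap, List.map_map, Function.comp_def]
  rw [this]
  apply List.Nodup.map
  · intro p q hpq
    have h1 := congrArg Prod.fst hpq
    have h2 := congrArg Prod.snd hpq
    simp only [Nat.cast_inj] at h1 h2
    exact Prod.ext h1 h2
  · exact List.Nodup.product (List.nodup_range) (List.nodup_range)

lemma mem_keys_iff (M : List (List Int)) (k : Int × Int) :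
    k ∈ ((pvPairs M).foldl pvUpd PySem.Dict.empty).keys ↔ k ∈ pvQuad (M.length / 2) := by
  rw [keys_fold, PySem.Set.mem_ofList]
  set n := M.length / 2 with hn
  simp only [pvPairs, ← hn, pvQuad, List.mem_map, List.mem_flatMap, List.mem_range]
  constructor
  · rintro ⟨p, ⟨i, hi, ⟨j, hj, rfl⟩⟩, rfl⟩
    exact ⟨min i (2*n-1-i), by omega, min j (2*n-1-j), by omega, rfl⟩
  · rintro ⟨a, ha, b, hb, rfl⟩
    refine ⟨((((min a (2*n-1-a) : Nat) : Int), ((min b (2*n-1-b) : Nat) : Int)), pvCell M a b),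
      ⟨a, by omega, ⟨b, by omega, rfl⟩⟩, ?_⟩
    have e1 : min a (2*n-1-a) = a := by omega
    have e2 : min b (2*n-1-b) = b := by omega
    rw [e1, e2]

lemma getD_fold (M : List (List Int)) (n a b : Nat) (hn : n = M.length / 2)
    (ha : a < n) (hb : b < n) :
    ((pvPairs M).foldl pvUpd PySem.Dict.empty).getD (((a : Nat) : Int), ((b : Nat) : Int)) 0
      = max (max (max (pvCell M a b) (pvCell M a (2*n-1-b)))
          (pvCell M (2*n-1-a) b)) (pvCell M (2*n-1-a) (2*n-1-b)) := by
  rw [PySem.Dict.getD_eq_get?_getD, get?_foldl_upd, pairs_filter M n a b hn ha hb]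
  simp [PySem.Dict.get?_empty, max_self, max_assoc]

lemma sum_flatMap_int {α : Type} (l : List α) (f : α → List Int) :
    (l.flatMap f).sum = (l.map (fun x => (f x).sum)).sum := by
  rw [List.flatMap, List.sum_flatten, List.map_map]
  rfl

lemma b_eq_spec (M : List (List Int)) : flippingMatrix_alt M = pvSpecSum M := by
  rw [b_eq_fold]
  set n := M.length / 2 with hn
  set d := (pvPairs M).foldl pvUpd PySem.Dict.empty with hd
  have hvals : d.values = d.keys.map (fun k => d.getD k 0) :=
    PySem.Dict.values_eq_map_keys d (nodup_keys_fold M) 0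
  have hperm : d.keys.Perm (pvQuad n) :=
    (List.perm_ext_iff_of_nodup (nodup_keys_fold M) (nodup_quad n)).mpr
      (fun k => mem_keys_iff M k)
  rw [hvals, List.Perm.sum_eq (List.Perm.map _ hperm)]
  simp only [pvQuad, List.map_flatMap, List.map_map]
  rw [sum_flatMap_int]
  simp only [pvSpecSum, ← hn]
  congr 1
  apply List.map_congr_left
  intro a ha
  have ha' : a < n := List.mem_range.mp ha
  congr 1
  apply List.map_congr_left
  intro b hb
  have hb' : b < n := List.mem_range.mp hb
  simp only [Function.comp_apply]
  exact getD_fold M n a b hn ha' hb'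

-- ===== VERDICT (by name: the statement is the Claim_ definition above) =====
theorem flippingMatrix_spec : Claim_equal_flippingMatrix := by
  intro M _ _
  unfold Spec_flippingMatrix
  rw [a_eq_spec M, b_eq_spec M]
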